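-- pv_equiv track=rewrite | github.com/areino/validate-taegis-parser | export_unparsed_events.py | aggregate_by_sensor
-- ===== SOURCE A (Python) =====
-- from collections import defaultdict
-- from typing import Dict, List, Tuple
--
-- def aggregate_by_sensor(events: List[Dict]) -> Dict[Tuple[str, str], List[Dict]]:
--     """Aggregate events by sensor_id and sensor_type."""
--     aggregated = defaultdict(list)
--
--     for event in events:
--         # Handle None values and missing keys
--         sensor_id = event.get('sensor_id') or 'unknown'
--         sensor_type = event.get('sensor_type') or 'unknown'
--         # Convert to string in case they're not already
--         sensor_id = str(sensor_id) if sensor_id is not None else 'unknown'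
--         sensor_type = str(sensor_type) if sensor_type is not None else 'unknown'
--         key = (sensor_id, sensor_type)
--         aggregated[key].append(event)
--
--     return dict(aggregated)
-- ===== SOURCE B (Python) =====
-- def aggregate_by_sensor(events):
--     """Aggregate events by sensor_id and sensor_type (two-pass: dedup keys, then filter)."""
--     def _key(event):
--         sensor_id = event.get('sensor_id') or 'unknown'
--         sensor_type = event.get('sensor_type') or 'unknown'
--         return (str(sensor_id), str(sensor_type))
--
--     keys = []
--     for event in events:
--         k = _key(event)
--         if k not in keys:
--             keys.append(k)
--     return {k: [e for e in events if _key(e) == k] for k in keys}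
-- ===== Notes on version B (the rewrite author's own statement) =====
-- stated objective: alternative
-- what changed: A builds the groups in one pass by appending each event into a defaultdict entry; B first collects the distinct key tuples in order of first occurrence and then builds each group by filtering the event list per key.
import Mathlib
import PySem

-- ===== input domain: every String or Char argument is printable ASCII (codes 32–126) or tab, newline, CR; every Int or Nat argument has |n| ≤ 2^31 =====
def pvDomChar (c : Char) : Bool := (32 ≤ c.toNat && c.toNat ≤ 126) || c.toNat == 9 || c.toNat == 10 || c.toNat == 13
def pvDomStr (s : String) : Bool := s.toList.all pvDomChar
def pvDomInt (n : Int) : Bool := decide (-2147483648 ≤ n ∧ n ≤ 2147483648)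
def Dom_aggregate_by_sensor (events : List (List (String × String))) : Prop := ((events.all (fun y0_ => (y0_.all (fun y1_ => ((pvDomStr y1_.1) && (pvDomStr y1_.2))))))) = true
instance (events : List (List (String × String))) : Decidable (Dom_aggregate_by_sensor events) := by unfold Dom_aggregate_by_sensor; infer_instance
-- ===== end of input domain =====

-- B groups by first collecting the distinct keys in order of first occurrence and then
-- filtering the event list once per key, instead of A's single pass appending into a dict.

-- ===== PORT A =====
-- Single pass: defaultdict(list), aggregated[key].append(event); return dict(aggregated).
def aggregate_by_sensor (events : List (List (String × String))) : List (String × String × List (List (String × String))) :=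
  let aggregated :=
    events.foldl (fun aggregated event =>
      -- sensor_id = event.get('sensor_id') or 'unknown'  ('or' maps None and '' to 'unknown')
      let sensor_id : String :=
        match (PySem.Dict.mk event).get? "sensor_id" with
        | none => "unknown"
        | some s => if s = "" then "unknown" else s
      let sensor_type : String :=
        match (PySem.Dict.mk event).get? "sensor_type" with
        | none => "unknown"
        | some s => if s = "" then "unknown" else s
      -- str(...) is the identity here: the values are already strings and never None after 'or'
      let key := (sensor_id, sensor_type)
      aggregated.modify key [] (· ++ [event]))
      (PySem.Dict.empty : PySem.Dict (String × String) (List (List (String × String))))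
  aggregated.items.map (fun p => (p.1.1, p.1.2, p.2))

-- ===== PORT B =====
-- _key(event), shared logic of Source B's helper
def pvKey (event : List (String × String)) : String × String :=
  (match (PySem.Dict.mk event).get? "sensor_id" with
   | none => "unknown"
   | some s => if s = "" then "unknown" else s,
   match (PySem.Dict.mk event).get? "sensor_type" with
   | none => "unknown"
   | some s => if s = "" then "unknown" else s)

def aggregate_by_sensor_alt (events : List (List (String × String))) : List (String × String × List (List (String × String))) :=
  let keys := events.foldl (fun ks event =>
      let k := pvKey event
      if ks.contains k then ks else ks ++ [k]) []
  keys.map (fun k => (k.1, k.2, events.filter (fun e => pvKey e == k)))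

-- ===== PRECONDITION & SPEC =====
def Spec_aggregate_by_sensor (events : List (List (String × String))) (out : List (String × String × List (List (String × String)))) : Prop := out = aggregate_by_sensor_alt events
instance (events : List (List (String × String))) (out : List (String × String × List (List (String × String)))) : Decidable (Spec_aggregate_by_sensor events out) := by unfold Spec_aggregate_by_sensor; infer_instance

-- ===== CLAIM (what is proved, stated in full; the proofs are below) =====
def Claim_equal_aggregate_by_sensor : Prop := ∀ (events : List (List (String × String))), Dom_aggregate_by_sensor events → Spec_aggregate_by_sensor events (aggregate_by_sensor events)

-- ===== LEMMAS AND PROOFS =====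

-- A's loop is the pair-keyed modify-append loop over (pvKey e, e)
theorem pv_foldA_eq (events : List (List (String × String))) :
    (events.foldl (fun aggregated event =>
      let sensor_id : String :=
        match (PySem.Dict.mk event).get? "sensor_id" with
        | none => "unknown"
        | some s => if s = "" then "unknown" else s
      let sensor_type : String :=
        match (PySem.Dict.mk event).get? "sensor_type" with
        | none => "unknown"
        | some s => if s = "" then "unknown" else s
      let key := (sensor_id, sensor_type)
      aggregated.modify key [] (· ++ [event]))
      (PySem.Dict.empty : PySem.Dict (String × String) (List (List (String × String)))))
    = (events.map (fun e => (pvKey e, e))).foldl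
        (fun d p => d.modify p.1 [] (· ++ [p.2])) PySem.Dict.empty := by
  rw [List.foldl_map]
  rfl

-- B's key loop is PySem.Set.ofList of the mapped keys
theorem pv_keysB_eq (events : List (List (String × String))) :
    (events.foldl (fun ks event =>
      let k := pvKey event
      if ks.contains k then ks else ks ++ [k]) [])
    = PySem.Set.ofList (events.map pvKey) := by
  rw [PySem.Set.ofList_eq_foldl, List.foldl_map]
  rfl

-- A's aggregation over the key/event pairs characterised: items as map over distinct keys, groups as filters
theorem pv_main (events : List (List (String × String))) :
    List.map (fun p => (p.1.1, p.1.2, p.2))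
      (((events.map (fun e => (pvKey e, e))).foldl
        (fun d p => d.modify p.1 [] (· ++ [p.2]))
        (PySem.Dict.empty : PySem.Dict (String × String) (List (List (String × String))))).items)
    = List.map (fun k => (k.1, k.2, events.filter (fun e => pvKey e == k)))
        (PySem.Set.ofList (events.map pvKey)) := by
  have hnd : (((events.map (fun e => (pvKey e, e))).foldl
      (fun d p => d.modify p.1 [] (· ++ [p.2]))
      (PySem.Dict.empty : PySem.Dict (String × String) (List (List (String × String))))).keys).Nodup := by
    rw [List.foldl_map]
    exact PySem.Dict.nodup_keys_foldl_modify_key _ _ _ _ _ PySem.Dict.nodup_keys_empty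
  rw [PySem.Dict.items_eq_map_keys _ hnd []]
  have hkeys : (((events.map (fun e => (pvKey e, e))).foldl
      (fun d p => d.modify p.1 [] (· ++ [p.2]))
      (PySem.Dict.empty : PySem.Dict (String × String) (List (List (String × String))))).keys)
      = PySem.Set.ofList (events.map pvKey) := by
    rw [List.foldl_map, PySem.Dict.keys_foldl_modify_key]
    simp [PySem.Dict.keys_empty, PySem.Set.update_nil_left]
  rw [hkeys, List.map_map]
  refine List.map_congr_left (fun k hk => ?_)
  have hg : (((events.map (fun e => (pvKey e, e))).foldl
      (fun d p => d.modify p.1 [] (· ++ [p.2]))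
      (PySem.Dict.empty : PySem.Dict (String × String) (List (List (String × String))))).getD k [])
      = events.filter (fun e => pvKey e == k) := by
    rw [PySem.Dict.getD_foldl_modify_append, PySem.Dict.getD_empty]
    simp [List.filter_map, List.map_map, Function.comp_def]
  simp [hg]

-- ===== VERDICT (by name: the statement is the Claim_ definition above) =====
theorem aggregate_by_sensor_spec : Claim_equal_aggregate_by_sensor := by
  intro events _
  unfold Spec_aggregate_by_sensor aggregate_by_sensor aggregate_by_sensor_alt
  rw [pv_foldA_eq, pv_keysB_eq]
  exact pv_main events
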